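-- pv_equiv track=rewrite | github.com/DmitryBozhko/CPU-Design-and-Simulation-Project | src/numeric_core/float32.py | _assemble_ieee
-- ===== SOURCE A (Python) =====
-- _EXP_WIDTH = 8
--
-- _FRAC_WIDTH = 23
--
-- _WORD_WIDTH = 32
--
-- def _normalize_bits_to_width(bits: list[int], width: int) -> list[int]:
--     # AI-BEGIN
--     """Clamp or zero-extend a bit vector to the requested width."""
--     # AI-END
--     normalized: list[int] = []
--     length = len(bits)
--     index = 0
--     while index < width:
--         if index < length:
--             normalized.append(bits[index] & 1)
--         else:
--             normalized.append(0)
--         index = index + 1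
--     return normalized
--
-- def _assemble_ieee(sign: int, exponent: list[int], fraction: list[int]) -> list[int]:
--     # AI-BEGIN
--     """Assemble IEEE-754 float32 fields into a 32-bit bit vector."""
--     # AI-END
--     exp_norm = _normalize_bits_to_width(exponent, _EXP_WIDTH)
--     frac_norm = _normalize_bits_to_width(fraction, _FRAC_WIDTH)
--     bits: list[int] = []
--     k = 0
--     while k < _WORD_WIDTH:
--         bits.append(0)
--         k = k + 1
--     i = 0
--     while i < _FRAC_WIDTH:
--         bits[i] = frac_norm[i] & 1
--         i = i + 1
--     j = 0
--     while j < _EXP_WIDTH: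
--         bits[23 + j] = exp_norm[j] & 1
--         j = j + 1
--     bits[31] = sign & 1
--     return bits
-- ===== SOURCE B (Python) =====
-- def _assemble_ieee(sign: int, exponent: list[int], fraction: list[int]) -> list[int]:
--     word = (sign & 1) << 31
--     for j in range(8):
--         word += ((exponent[j] & 1) if j < len(exponent) else 0) << (23 + j)
--     for i in range(23):
--         word += ((fraction[i] & 1) if i < len(fraction) else 0) << i
--     return [(word >> k) & 1 for k in range(32)]
-- ===== Notes on version B (the rewrite author's own statement) =====
-- stated objective: alternative
-- what changed: B packs the three fields into a single Python integer with shift-and-add bit arithmetic and then unpacks the 32-bit word back into a list by shifting and masking, instead of allocating a 32-zero list and overwriting slices positionally.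
import Mathlib
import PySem

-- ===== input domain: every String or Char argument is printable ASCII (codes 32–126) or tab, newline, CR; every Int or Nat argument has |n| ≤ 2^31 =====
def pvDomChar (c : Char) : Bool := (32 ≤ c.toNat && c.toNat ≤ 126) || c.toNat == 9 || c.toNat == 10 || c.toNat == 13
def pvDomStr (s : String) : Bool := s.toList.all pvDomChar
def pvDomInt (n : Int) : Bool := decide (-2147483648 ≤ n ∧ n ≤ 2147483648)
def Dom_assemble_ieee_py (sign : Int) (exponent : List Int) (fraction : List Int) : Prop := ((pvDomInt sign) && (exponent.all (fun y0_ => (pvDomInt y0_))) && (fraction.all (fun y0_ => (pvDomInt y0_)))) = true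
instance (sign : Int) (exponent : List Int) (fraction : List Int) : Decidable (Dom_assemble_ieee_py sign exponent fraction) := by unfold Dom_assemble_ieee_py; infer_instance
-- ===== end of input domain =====

-- B packs the three fields into one integer word by shift-and-add and unpacks it
-- bit by bit, instead of overwriting a pre-zeroed 32-element buffer positionally.

-- ===== PORT A =====
-- 'b & 1' on an int is ported as PySem.Int.mod b 2 (Python's & on ints agrees with
-- floor-mod 2 for bit 0, for negative ints too); the while loops become folds over
-- List.range; 'bits[i] = v' on an in-range index is List.set (exact in range).
def normalize_bits_to_width_py (bits : List Int) (width : Nat) : List Int :=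
  (List.range width).foldl
    (fun normalized index =>
      if index < bits.length then
        normalized ++ [PySem.Int.mod (bits.getD index 0) 2]
      else
        normalized ++ [(0 : Int)])
    []

def assemble_ieee_py (sign : Int) (exponent : List Int) (fraction : List Int) : List Int :=
  let exp_norm := normalize_bits_to_width_py exponent 8
  let frac_norm := normalize_bits_to_width_py fraction 23
  let bits : List Int := (List.range 32).foldl (fun acc _ => acc ++ [(0 : Int)]) []
  let bits := (List.range 23).foldl
    (fun b i => b.set i (PySem.Int.mod (frac_norm.getD i 0) 2)) bits
  let bits := (List.range 8).foldl
    (fun b j => b.set (23 + j) (PySem.Int.mod (exp_norm.getD j 0) 2)) bits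
  bits.set 31 (PySem.Int.mod sign 2)

-- ===== PORT B =====
-- 'x << n' on the nonnegative bit x is exactly x * 2^n, and '(word >> k) & 1' on the
-- nonnegative word is exactly mod (floordiv word 2^k) 2; '& 1' is floor-mod 2 as in A.
def assemble_ieee_py_alt (sign : Int) (exponent : List Int) (fraction : List Int) : List Int :=
  let word : Int := PySem.Int.mod sign 2 * 2 ^ 31
  let word := (List.range 8).foldl
    (fun w j => w + (if j < exponent.length then PySem.Int.mod (exponent.getD j 0) 2 else 0) * 2 ^ (23 + j)) word
  let word := (List.range 23).foldl
    (fun w i => w + (if i < fraction.length then PySem.Int.mod (fraction.getD i 0) 2 else 0) * 2 ^ i) word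
  (List.range 32).map (fun k => PySem.Int.mod (PySem.Int.floordiv word (2 ^ k)) 2)

-- ===== PRECONDITION & SPEC =====
def Spec_assemble_ieee_py (sign : Int) (exponent : List Int) (fraction : List Int) (out : List Int) : Prop := out = assemble_ieee_py_alt sign exponent fraction
instance (sign : Int) (exponent : List Int) (fraction : List Int) (out : List Int) : Decidable (Spec_assemble_ieee_py sign exponent fraction out) := by unfold Spec_assemble_ieee_py; infer_instance

-- ===== CLAIM (what is proved, stated in full; the proofs are below) =====
def Claim_equal_assemble_ieee_py : Prop := ∀ (sign : Int) (exponent : List Int) (fraction : List Int), Dom_assemble_ieee_py sign exponent fraction → Spec_assemble_ieee_py sign exponent fraction (assemble_ieee_py sign exponent fraction)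

-- ===== LEMMAS AND PROOFS =====

-- canonical elementwise description of a normalized field
def normElem (bits : List Int) (i : Nat) : Int :=
  if i < bits.length then PySem.Int.mod (bits.getD i 0) 2 else 0

theorem norm_eq_map_range (bits : List Int) (width : Nat) :
    normalize_bits_to_width_py bits width = (List.range width).map (normElem bits) := by
  induction width with
  | zero => rfl
  | succ w ih =>
      simp only [normalize_bits_to_width_py, List.range_succ, List.foldl_append,
        List.foldl_cons, List.foldl_nil] at *
      rw [ih, List.map_append]
      by_cases h : w < bits.length <;> simp [normElem, h]

theorem mod_two_idem (b : Int) : PySem.Int.mod (PySem.Int.mod b 2) 2 = PySem.Int.mod b 2 := by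
  rw [PySem.Int.mod_eq_emod_of_pos (by norm_num), PySem.Int.mod_eq_emod_of_pos (by norm_num),
    Int.emod_emod_of_dvd _ (dvd_refl 2)]

theorem mod_normElem (bits : List Int) (i : Nat) :
    PySem.Int.mod (normElem bits i) 2 = normElem bits i := by
  unfold normElem
  split
  · exact mod_two_idem _
  · decide

theorem normElem_zero_or_one (bits : List Int) (i : Nat) :
    normElem bits i = 0 ∨ normElem bits i = 1 := by
  unfold normElem
  split
  · rw [PySem.Int.mod_eq_emod_of_pos (by norm_num)]
    exact Int.emod_two_eq _
  · exact Or.inl rfl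

-- loop shape of A: writing L's masked values at offset off into buffer B
theorem setloop (m : Int → Int) (n : Nat) (L B : List Int) (off : Nat)
    (hL : n ≤ L.length) (hB : off + n ≤ B.length) :
    (List.range n).foldl (fun b i => b.set (off + i) (m (L.getD i 0))) B
      = B.take off ++ (L.take n).map m ++ B.drop (off + n) := by
  induction n with
  | zero => simp
  | succ k ih =>
      rw [List.range_succ, List.foldl_append, List.foldl_cons, List.foldl_nil,
        ih (by omega) (by omega)]
      have hoff : off ≤ B.length := by omega
      have hlen1 : (B.take off).length = off := by simp; omega
      have hlen2 : ((L.take k).map m).length = k := by simp; omega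
      have hidx : off + k < B.length := by omega
      have hkL : k < L.length := by omega
      have e0 : L.getD k 0 = L[k] := by
        simp [List.getD, List.getElem?_eq_getElem hkL]
      have e1 : (B.take off ++ ((L.take k).map m ++ B.drop (off + k))).set (off + k) (m (L.getD k 0))
          = B.take off ++ (((L.take k).map m ++ B.drop (off + k)).set k (m (L.getD k 0))) := by
        rw [List.set_append, if_neg (by rw [hlen1]; omega), hlen1, Nat.add_sub_cancel_left]
      have e2 : ((L.take k).map m ++ B.drop (off + k)).set k (m (L.getD k 0))
          = (L.take k).map m ++ ((B.drop (off + k)).set 0 (m (L.getD k 0))) := by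
        rw [List.set_append, if_neg (by rw [hlen2]; omega), hlen2, Nat.sub_self]
      have e3 : (B.drop (off + k)).set 0 (m (L.getD k 0)) = m (L.getD k 0) :: B.drop (off + k + 1) := by
        rw [List.drop_eq_getElem_cons hidx]; rfl
      have e4 : (L.take (k + 1)).map m = (L.take k).map m ++ [m L[k]] := by
        rw [List.take_add_one, List.getElem?_eq_getElem hkL]
        simp only [Option.toList_some, List.map_append, List.map_cons, List.map_nil]
      simp only [List.append_assoc] at *
      rw [e1, e2, e3, e4, e0]
      simp [List.append_assoc, Nat.add_assoc]

-- A's result is the concatenation of the three canonical fields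
theorem a_eq_fields (sign : Int) (exponent fraction : List Int) :
    assemble_ieee_py sign exponent fraction
      = (List.range 23).map (normElem fraction) ++ (List.range 8).map (normElem exponent)
        ++ [PySem.Int.mod sign 2] := by
  unfold assemble_ieee_py
  rw [norm_eq_map_range, norm_eq_map_range]
  set m : Int → Int := fun b => PySem.Int.mod b 2 with hm
  set F : List Int := (List.range 23).map (normElem fraction) with hF
  set E : List Int := (List.range 8).map (normElem exponent) with hE
  have hFlen : F.length = 23 := by simp [hF]
  have hElen : E.length = 8 := by simp [hE]
  have hbits0 : (List.range 32).foldl (fun acc _ => acc ++ [(0 : Int)]) [] = List.replicate 32 0 := by rfl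
  have hmF : F.map m = F := by
    simp only [hF, hm, List.map_map]
    exact List.map_congr_left (fun i _ => mod_normElem fraction i)
  have hmE : E.map m = E := by
    simp only [hE, hm, List.map_map]
    exact List.map_congr_left (fun i _ => mod_normElem exponent i)
  have h1 : (List.range 23).foldl (fun b i => b.set i (PySem.Int.mod (F.getD i 0) 2)) (List.replicate 32 0)
      = F ++ List.replicate 9 0 := by
    have := setloop m 23 F (List.replicate 32 0) 0 (by omega) (by simp)
    simp only [Nat.zero_add] at this
    rw [this]
    simp [List.take_of_length_le (le_of_eq hFlen), hmF]
  have h2 : (List.range 8).foldl (fun b j => b.set (23 + j) (PySem.Int.mod (E.getD j 0) 2)) (F ++ List.replicate 9 0)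
      = F ++ E ++ List.replicate 1 0 := by
    have := setloop m 8 E (F ++ List.replicate 9 0) 23 (by omega) (by simp [hFlen])
    rw [this]
    have ht : (F ++ List.replicate 9 (0:Int)).take 23 = F := List.take_left' hFlen
    have hd : (F ++ List.replicate 9 (0:Int)).drop 31 = List.replicate 1 0 := by
      rw [List.drop_append, List.drop_eq_nil_of_le (by omega : F.length ≤ 31), hFlen]
      rfl
    rw [ht, hd, List.take_of_length_le (le_of_eq hElen), hmE, List.append_assoc]
  have h3 : (F ++ E ++ List.replicate 1 (0:Int)).set 31 (PySem.Int.mod sign 2)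
      = F ++ E ++ [PySem.Int.mod sign 2] := by
    rw [List.set_append, if_neg (by simp [hFlen, hElen])]
    simp [hFlen, hElen]
  simp only [hbits0, h1, h2, h3]

-- ===== bit packing / unpacking theory for B =====

def pack : List Int → Int
  | [] => 0
  | c :: cs => c + 2 * pack cs

theorem pack_append (xs ys : List Int) :
    pack (xs ++ ys) = pack xs + 2 ^ xs.length * pack ys := by
  induction xs with
  | nil => simp [pack]
  | cons c cs ih => simp [pack, ih, pow_succ]; ring

theorem pack_map_range (f : Nat → Int) (n : Nat) :
    pack ((List.range n).map f) = ((List.range n).map (fun i => f i * 2 ^ i)).sum := by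
  induction n with
  | zero => rfl
  | succ w ih =>
      rw [List.range_succ, List.map_append, List.map_append, pack_append, List.sum_append, ih]
      simp [pack, mul_comm]

theorem pack_nonneg (cs : List Int) (h : ∀ c ∈ cs, c = 0 ∨ c = 1) : 0 ≤ pack cs := by
  induction cs with
  | nil => simp [pack]
  | cons c cs ih =>
      have hc := h c (by simp)
      have := ih (fun d hd => h d (by simp [hd]))
      rcases hc with hc | hc <;> simp [pack, hc] <;> omega

-- unpacking recovers each bit of a 0/1 list
theorem pack_extract (cs : List Int) (h : ∀ c ∈ cs, c = 0 ∨ c = 1) :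
    ∀ k, k < cs.length →
      PySem.Int.mod (PySem.Int.floordiv (pack cs) (2 ^ k)) 2 = cs.getD k 0 := by
  induction cs with
  | nil => intro k hk; simp at hk
  | cons c cs ih =>
      intro k hk
      have hc := h c (by simp)
      have hrest : ∀ d ∈ cs, d = 0 ∨ d = 1 := fun d hd => h d (by simp [hd])
      have hp : 0 ≤ pack cs := pack_nonneg cs hrest
      cases k with
      | zero =>
          rw [pow_zero, PySem.Int.floordiv_eq_ediv_of_pos (by norm_num),
            PySem.Int.mod_eq_emod_of_pos (by norm_num)]
          simp only [pack, Int.ediv_one, List.getD_cons_zero]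
          rcases hc with hc | hc <;> simp [hc]
      | succ k =>
          have hk' : k < cs.length := by simpa using hk
          have hdiv : PySem.Int.floordiv (pack (c :: cs)) (2 ^ (k + 1))
              = PySem.Int.floordiv (pack cs) (2 ^ k) := by
            rw [PySem.Int.floordiv_eq_ediv_of_pos (by positivity),
              PySem.Int.floordiv_eq_ediv_of_pos (by positivity)]
            have : pack (c :: cs) = c + 2 * pack cs := rfl
            rw [this, pow_succ, mul_comm ((2:Int)^k) 2, ← Int.ediv_ediv_of_nonneg (by rcases hc with hc | hc <;> omega)]
            congr 1
            rw [Int.add_mul_ediv_left _ _ (by norm_num : (2:Int) ≠ 0)]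
            rcases hc with hc | hc <;> simp [hc]
          rw [hdiv, ih hrest k hk']
          simp

-- B's packed word equals pack of the concatenated fields
theorem word_eq_pack (sign : Int) (exponent fraction : List Int) :
    (List.range 23).foldl
       (fun w i => w + (if i < fraction.length then PySem.Int.mod (fraction.getD i 0) 2 else 0) * 2 ^ i)
       ((List.range 8).foldl
         (fun w j => w + (if j < exponent.length then PySem.Int.mod (exponent.getD j 0) 2 else 0) * 2 ^ (23 + j))
         (PySem.Int.mod sign 2 * 2 ^ 31))
      = pack ((List.range 23).map (normElem fraction) ++ (List.range 8).map (normElem exponent)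
        ++ [PySem.Int.mod sign 2]) := by
  rw [pack_append, pack_append]
  simp only [List.length_map, List.length_range]
  have hE : pack ((List.range 8).map (normElem exponent))
      = ((List.range 8).map (fun j => normElem exponent j * 2 ^ j)).sum := pack_map_range _ 8
  have hF : pack ((List.range 23).map (normElem fraction))
      = ((List.range 23).map (fun i => normElem fraction i * 2 ^ i)).sum := pack_map_range _ 23
  have hS : pack [PySem.Int.mod sign 2] = PySem.Int.mod sign 2 := by simp [pack]
  rw [PySem.List.foldl_add, PySem.List.foldl_add, hE, hF, hS]
  have he : (List.range 8).map (fun j => (if j < exponent.length then PySem.Int.mod (exponent.getD j 0) 2 else 0) * 2 ^ (23 + j))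
      = (List.range 8).map (fun j => 2 ^ 23 * (normElem exponent j * 2 ^ j)) := by
    refine List.map_congr_left (fun j _ => ?_)
    simp only [normElem, pow_add]
    ring
  have hf : (List.range 23).map (fun i => (if i < fraction.length then PySem.Int.mod (fraction.getD i 0) 2 else 0) * 2 ^ i)
      = (List.range 23).map (fun i => normElem fraction i * 2 ^ i) := by
    refine List.map_congr_left (fun i _ => ?_)
    simp only [normElem]
  rw [he, hf, List.sum_map_mul_left]
  simp only [List.length_append, List.length_map, List.length_range]
  norm_num
  ring

-- ===== VERDICT (by name: the statement is the Claim_ definition above) =====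
theorem assemble_ieee_py_spec : Claim_equal_assemble_ieee_py := by
  intro sign exponent fraction _
  unfold Spec_assemble_ieee_py
  rw [a_eq_fields]
  set L : List Int := (List.range 23).map (normElem fraction) ++ (List.range 8).map (normElem exponent)
    ++ [PySem.Int.mod sign 2] with hL
  have hLlen : L.length = 32 := by simp [hL]
  have h01 : ∀ c ∈ L, c = 0 ∨ c = 1 := by
    intro c hc
    simp only [hL, List.mem_append, List.mem_map, List.mem_range, List.mem_singleton] at hc
    rcases hc with (⟨i, _, rfl⟩ | ⟨j, _, rfl⟩) | rfl
    · exact normElem_zero_or_one _ _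
    · exact normElem_zero_or_one _ _
    · rw [PySem.Int.mod_eq_emod_of_pos (by norm_num)]
      exact Int.emod_two_eq _
  show L = (List.range 32).map (fun k => PySem.Int.mod (PySem.Int.floordiv
    ((List.range 23).foldl
       (fun w i => w + (if i < fraction.length then PySem.Int.mod (fraction.getD i 0) 2 else 0) * 2 ^ i)
       ((List.range 8).foldl
         (fun w j => w + (if j < exponent.length then PySem.Int.mod (exponent.getD j 0) 2 else 0) * 2 ^ (23 + j))
         (PySem.Int.mod sign 2 * 2 ^ 31))) (2 ^ k)) 2)
  rw [word_eq_pack sign exponent fraction, ← hL]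
  apply List.ext_getElem
  · simp [hLlen]
  · intro k h1 h2
    have hk : k < 32 := by simpa using h1
    have := pack_extract L h01 k (by omega)
    simp only [List.getElem_map, List.getElem_range]
    rw [this]
    simp [List.getD, List.getElem?_eq_getElem (by omega : k < L.length)]
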